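-- pv_equiv track=rewrite | github.com/fallingstar56/REALM_Teleop | realm/helpers.py | process_droid_categories
-- ===== SOURCE A (Python) =====
-- def find_and_remove_category(categories_dict, obj_category):
--     for theme, sub_categories in categories_dict.items():
--         for category, obj_list in sub_categories.items():
--             if obj_category in obj_list:
--                 return theme
--     return None
--
-- def process_droid_categories(original_dict, obj_category):
--     processed_dict = original_dict.copy()
--
--     theme_to_pop = find_and_remove_category(processed_dict, obj_category)
--
--     if theme_to_pop:
--         processed_dict.pop(theme_to_pop)
--
--     flattened_list = []
--     for sub_categories in processed_dict.values():
--         for obj_list in sub_categories.values():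
--             flattened_list.extend(obj_list)
--
--     return flattened_list
-- ===== SOURCE B (Python) =====
-- def process_droid_categories(original_dict, obj_category):
--     per_theme = []
--     found = None
--     for theme, sub_categories in original_dict.items():
--         flat = [obj for obj_list in sub_categories.values() for obj in obj_list]
--         per_theme.append((theme, flat))
--         if found is None and obj_category in flat:
--             found = theme
--     return [obj for theme, flat in per_theme if theme != found for obj in flat]
-- ===== Notes on version B (the rewrite author's own statement) =====
-- stated objective: alternative
-- what changed: Single pass over the dict building per-theme flattened lists while recording the first theme containing the category, then one comprehension concatenating every theme except the found one, instead of copy + separate search + pop + separate flatten passes.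
-- intended difference: When the first theme containing obj_category has the empty-string key "", A's 'if theme_to_pop:' truthiness test fails to pop it so A returns the full flatten including that theme's objects, while B skips the found theme as intended by the function's purpose (remove the theme containing the category). — e.g. on process_droid_categories([("", [("c", ["x"])])], "x"): A returns ["x"], B returns []
import Mathlib
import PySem

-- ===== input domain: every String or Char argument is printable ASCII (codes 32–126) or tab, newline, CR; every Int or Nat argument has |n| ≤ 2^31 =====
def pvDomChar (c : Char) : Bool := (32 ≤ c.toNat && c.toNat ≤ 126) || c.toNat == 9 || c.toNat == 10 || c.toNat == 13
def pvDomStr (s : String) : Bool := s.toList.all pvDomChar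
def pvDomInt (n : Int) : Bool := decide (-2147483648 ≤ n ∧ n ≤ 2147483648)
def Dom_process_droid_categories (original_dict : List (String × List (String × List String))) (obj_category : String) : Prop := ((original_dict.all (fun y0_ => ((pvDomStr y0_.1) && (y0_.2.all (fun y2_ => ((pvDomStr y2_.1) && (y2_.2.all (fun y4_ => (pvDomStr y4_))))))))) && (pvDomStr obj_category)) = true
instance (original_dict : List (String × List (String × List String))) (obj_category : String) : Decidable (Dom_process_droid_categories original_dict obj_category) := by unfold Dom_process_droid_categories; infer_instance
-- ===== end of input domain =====

-- ===== PORT A =====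
-- B changes the decomposition: one pass building per-theme flattened lists + first-match theme, then one concatenation; same cost, no copy/pop.
-- inner loop of find_and_remove_category: 'for category, obj_list in sub_categories.items(): if obj_category in obj_list: return theme'
def pvFindInner (obj_category : String) : List (String × List String) → Bool
  | [] => false
  | (_, obj_list) :: rest =>
    if obj_category ∈ obj_list then true else pvFindInner obj_category rest

-- outer loop: 'for theme, sub_categories in categories_dict.items(): … return theme / return None'
def pvFindOuter (obj_category : String) :
    List (String × PySem.Dict String (List String)) → Option String
  | [] => none
  | (theme, sub_categories) :: rest =>
    if pvFindInner obj_category sub_categories.items then some theme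
    else pvFindOuter obj_category rest

def find_and_remove_category (categories_dict : PySem.Dict String (PySem.Dict String (List String)))
    (obj_category : String) : Option String :=
  pvFindOuter obj_category categories_dict.items

def process_droid_categories (original_dict : List (String × List (String × List String))) (obj_category : String) : List String :=
  -- the dict[str, dict[str, list[str]]] argument, as Python receives it
  let processed_dict : PySem.Dict String (PySem.Dict String (List String)) :=
    PySem.Dict.ofList (original_dict.map (fun p => (p.1, PySem.Dict.ofList p.2)))
  let theme_to_pop := find_and_remove_category processed_dict obj_category
  -- 'if theme_to_pop: processed_dict.pop(theme_to_pop)' — Python truthiness: None and "" are falsy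
  let processed_dict :=
    match theme_to_pop with
    | some t => if t = "" then processed_dict else processed_dict.erase t
    | none => processed_dict
  processed_dict.values.foldl
    (fun flattened_list sub_categories =>
      sub_categories.values.foldl (fun fl obj_list => fl ++ obj_list) flattened_list) []

-- ===== PORT B =====
def process_droid_categories_alt (original_dict : List (String × List (String × List String))) (obj_category : String) : List String :=
  let d : PySem.Dict String (PySem.Dict String (List String)) :=
    PySem.Dict.ofList (original_dict.map (fun p => (p.1, PySem.Dict.ofList p.2)))
  -- single pass: per-theme flattened lists and the first theme whose flattened list contains obj_category
  let st := d.items.foldl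
    (fun (st : List (String × List String) × Option String) p =>
      let flat := p.2.values.flatten
      let found :=
        match st.2 with
        | some t => some t
        | none => if obj_category ∈ flat then some p.1 else none
      (st.1 ++ [(p.1, flat)], found))
    ([], none)
  -- '[obj for theme, flat in per_theme if theme != found for obj in flat]'
  (st.1.filter (fun tf => st.2 != some tf.1)).flatMap (fun tf => tf.2)

-- ===== PRECONDITION & SPEC =====
-- When the first theme containing obj_category has the empty-string key "", A's 'if theme_to_pop:'
-- truthiness test fails to pop it, so A keeps that theme's objects; B skips the found theme, the
-- intended behaviour (remove the theme containing the category).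
def D_process_droid_categories (original_dict : List (String × List (String × List String))) (obj_category : String) : Prop :=
  (((PySem.Dict.ofList (original_dict.map (fun p => (p.1, PySem.Dict.ofList p.2)))).items.find?
      (fun p => p.2.values.any (fun obj_list => obj_category ∈ obj_list))).map Prod.fst) = some ""
instance (original_dict : List (String × List (String × List String))) (obj_category : String) : Decidable (D_process_droid_categories original_dict obj_category) := by unfold D_process_droid_categories; infer_instance

def Spec_process_droid_categories (original_dict : List (String × List (String × List String))) (obj_category : String) (out : List String) : Prop := ¬ D_process_droid_categories original_dict obj_category → out = process_droid_categories_alt original_dict obj_category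
instance (original_dict : List (String × List (String × List String))) (obj_category : String) (out : List String) : Decidable (Spec_process_droid_categories original_dict obj_category out) := by unfold Spec_process_droid_categories; infer_instance

def pvDiffWitness_process_droid_categories : (List (String × List (String × List String))) × String :=
  ([("", [("c", ["x"])])], "x")
def pvDiffWitnessOut_process_droid_categories : (List String) × (List String) := (["x"], [])

-- ===== CLAIM (what is proved, stated in full; the proofs are below) =====
def Claim_unchanged_process_droid_categories : Prop := ∀ (original_dict : List (String × List (String × List String))) (obj_category : String), Dom_process_droid_categories original_dict obj_category → Spec_process_droid_categories original_dict obj_category (process_droid_categories original_dict obj_category)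
def Claim_changed_process_droid_categories : Prop := Dom_process_droid_categories (pvDiffWitness_process_droid_categories.1) (pvDiffWitness_process_droid_categories.2) ∧ D_process_droid_categories (pvDiffWitness_process_droid_categories.1) (pvDiffWitness_process_droid_categories.2) ∧ process_droid_categories (pvDiffWitness_process_droid_categories.1) (pvDiffWitness_process_droid_categories.2) = pvDiffWitnessOut_process_droid_categories.1 ∧ process_droid_categories_alt (pvDiffWitness_process_droid_categories.1) (pvDiffWitness_process_droid_categories.2) = pvDiffWitnessOut_process_droid_categories.2 ∧ pvDiffWitnessOut_process_droid_categories.1 ≠ pvDiffWitnessOut_process_droid_categories.2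
def Claim_exact_process_droid_categories : Prop := ∀ (original_dict : List (String × List (String × List String))) (obj_category : String), Dom_process_droid_categories original_dict obj_category → D_process_droid_categories original_dict obj_category → process_droid_categories original_dict obj_category ≠ process_droid_categories_alt original_dict obj_category

-- ===== LEMMAS AND PROOFS =====

-- the hit test both programs use, as one predicate
def pvHit (obj : String) (subs : PySem.Dict String (List String)) : Bool :=
  subs.values.any (fun obj_list => obj ∈ obj_list)

theorem pvFindInner_eq (obj : String) (l : List (String × List String)) :
    pvFindInner obj l = l.any (fun q => decide (obj ∈ q.2)) := by
  induction l with
  | nil => rfl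
  | cons q rest ih =>
    obtain ⟨c, ol⟩ := q
    rw [pvFindInner]
    by_cases h : obj ∈ ol <;> simp [h, ih]

theorem pvHit_eq (obj : String) (subs : PySem.Dict String (List String)) :
    pvHit obj subs = pvFindInner obj subs.items := by
  simp [pvHit, pvFindInner_eq, PySem.Dict.values, List.any_map, Function.comp_def]

theorem pvHit_eq_mem_flatten (obj : String) (subs : PySem.Dict String (List String)) :
    pvHit obj subs = decide (obj ∈ subs.values.flatten) := by
  rw [pvHit, Bool.eq_iff_iff]
  simp [List.any_eq_true, List.mem_flatten]

theorem pvFindOuter_eq_find? (obj : String) (L : List (String × PySem.Dict String (List String))) :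
    pvFindOuter obj L = (L.find? (fun p => pvHit obj p.2)).map Prod.fst := by
  induction L with
  | nil => rfl
  | cons p rest ih =>
    obtain ⟨t, subs⟩ := p
    rw [pvFindOuter, ← pvHit_eq]
    cases hh : pvHit obj subs with
    | true =>
      rw [List.find?_cons_of_pos (by simpa using hh)]
      simp
    | false =>
      rw [List.find?_cons_of_neg (by simpa using hh)]
      simp [ih]

-- B's single pass, characterised
theorem pvFoldB (obj : String) (L : List (String × PySem.Dict String (List String)))
    (acc : List (String × List String)) (f0 : Option String) :
    L.foldl
      (fun (st : List (String × List String) × Option String) p =>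
        let flat := p.2.values.flatten
        let found :=
          match st.2 with
          | some t => some t
          | none => if obj ∈ flat then some p.1 else none
        (st.1 ++ [(p.1, flat)], found))
      (acc, f0)
    = (acc ++ L.map (fun p => (p.1, p.2.values.flatten)),
       f0.or ((L.find? (fun p => pvHit obj p.2)).map Prod.fst)) := by
  induction L generalizing acc f0 with
  | nil => simp
  | cons p rest ih =>
    obtain ⟨t, subs⟩ := p
    simp only [List.foldl_cons, List.map_cons]
    cases f0 with
    | some u =>
      rw [ih]
      simp
    | none =>
      cases hh : pvHit obj subs with
      | true =>
        rw [ih, List.find?_cons_of_pos (by simpa using hh)]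
        rw [pvHit_eq_mem_flatten] at hh
        simp only [decide_eq_true_eq] at hh
        simp [hh]
      | false =>
        rw [ih, List.find?_cons_of_neg (by simpa using hh)]
        rw [pvHit_eq_mem_flatten] at hh
        simp only [decide_eq_false_iff_not] at hh
        simp [hh]

theorem pvFoldB_fst (obj : String) (L : List (String × PySem.Dict String (List String))) :
    (L.foldl
      (fun (st : List (String × List String) × Option String) p =>
        let flat := p.2.values.flatten
        let found :=
          match st.2 with
          | some t => some t
          | none => if obj ∈ flat then some p.1 else none
        (st.1 ++ [(p.1, flat)], found))
      ([], none)).1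
    = L.map (fun p => (p.1, p.2.values.flatten)) := by
  rw [pvFoldB]; simp

theorem pvFoldB_snd (obj : String) (L : List (String × PySem.Dict String (List String))) :
    (L.foldl
      (fun (st : List (String × List String) × Option String) p =>
        let flat := p.2.values.flatten
        let found :=
          match st.2 with
          | some t => some t
          | none => if obj ∈ flat then some p.1 else none
        (st.1 ++ [(p.1, flat)], found))
      ([], none)).2
    = (L.find? (fun p => pvHit obj p.2)).map Prod.fst := by
  rw [pvFoldB]; simp

-- A's flatten loop over (theme, dict) pairs, closed form
theorem pvFlatPairs (M : List (String × PySem.Dict String (List String))) (acc : List String) :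
    M.foldl (fun fl p => p.2.items.foldl (fun a q => a ++ q.2) fl) acc
      = acc ++ M.flatMap (fun p => p.2.items.flatMap (fun q => q.2)) := by
  induction M generalizing acc with
  | nil => simp
  | cons p rest ih =>
    rw [List.foldl_cons, PySem.List.foldl_append_eq_flatMap, ih, List.flatMap_cons,
      List.append_assoc]

theorem process_eq (original_dict : List (String × List (String × List String))) (obj_category : String)
    (hD : ¬ D_process_droid_categories original_dict obj_category) :
    process_droid_categories original_dict obj_category
      = process_droid_categories_alt original_dict obj_category := by
  unfold D_process_droid_categories at hD
  simp only [process_droid_categories, process_droid_categories_alt, find_and_remove_category]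
  rw [pvFindOuter_eq_find?]
  simp only [pvFoldB_fst, pvFoldB_snd]
  simp only [pvHit]
  generalize hdL : (PySem.Dict.ofList (original_dict.map (fun p => (p.1, PySem.Dict.ofList p.2)))) = d at hD ⊢
  obtain ⟨L⟩ := d
  cases hf : Option.map Prod.fst (List.find? (fun p => p.2.values.any (fun obj_list => obj_category ∈ obj_list)) L) with
  | none =>
    simp only [hf, PySem.Dict.values, List.foldl_map, List.filter_map, List.flatMap_map]
    rw [pvFlatPairs]
    rw [List.filter_eq_self.mpr (fun p _ => by simp [Function.comp])]
    simp [List.flatMap_def, PySem.Dict.values, List.flatMap_map]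
  | some t =>
    rw [hf] at hD
    have ht : t ≠ "" := fun h => hD (by rw [h])
    simp only [hf, PySem.Dict.erase, PySem.Dict.values, List.foldl_map, List.filter_map,
      List.flatMap_map]
    rw [if_neg ht, pvFlatPairs]
    rw [List.filter_congr (fun p _ => show
        ((fun tf : String × List String => some t != some tf.1) ∘
          (fun p : String × PySem.Dict String (List String) =>
            (p.1, (List.map (fun x => x.2) p.2.items).flatten))) p = (!(p.1 == t)) from by
      by_cases he : p.1 = t
      · simp [Function.comp, he]
      · have h2 : (p.1 == t) = false := beq_eq_false_iff_ne.mpr he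
        have h3 : ¬ t = p.1 := fun hh => he hh.symm
        simp [Function.comp, h2, h3])]
    simp [List.flatMap_def]

-- sums over a filtered list never exceed sums over the list
theorem pvSumFilterLe {α : Type} (f : α → Nat) (pred : α → Bool) (L : List α) :
    ((L.filter pred).map f).sum ≤ (L.map f).sum := by
  induction L with
  | nil => simp
  | cons a rest ih =>
    rw [List.filter_cons]
    by_cases hp : pred a = true
    · simp [hp]; omega
    · simp [hp]; omega

theorem pvSumFilterLt {α : Type} (f : α → Nat) (pred : α → Bool) (L : List α) (p0 : α)
    (h0 : p0 ∈ L) (hnp : pred p0 = false) (hpos : 0 < f p0) :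
    ((L.filter pred).map f).sum < (L.map f).sum := by
  induction L with
  | nil => cases h0
  | cons a rest ih =>
    rw [List.filter_cons]
    rcases List.mem_cons.mp h0 with h | h
    · subst h
      have hle := pvSumFilterLe f pred rest
      simp [hnp]; omega
    · have hih := ih h
      by_cases ha : pred a = true
      · simp [ha]; omega
      · simp [ha]; omega

theorem process_ne (original_dict : List (String × List (String × List String))) (obj_category : String)
    (hD : D_process_droid_categories original_dict obj_category) :
    process_droid_categories original_dict obj_category
      ≠ process_droid_categories_alt original_dict obj_category := by
  unfold D_process_droid_categories at hD
  simp only [process_droid_categories, process_droid_categories_alt, find_and_remove_category]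
  rw [pvFindOuter_eq_find?]
  simp only [pvFoldB_fst, pvFoldB_snd]
  simp only [pvHit]
  generalize hdL : (PySem.Dict.ofList (original_dict.map (fun p => (p.1, PySem.Dict.ofList p.2)))) = d at hD ⊢
  obtain ⟨L⟩ := d
  -- from D_: the find? succeeds with key ""
  obtain ⟨p0, hp0, hk⟩ : ∃ p0, (List.find? (fun p => p.2.values.any (fun obj_list => obj_category ∈ obj_list)) L) = some p0 ∧ p0.1 = "" := by
    cases hf : (List.find? (fun p => p.2.values.any (fun obj_list => obj_category ∈ obj_list)) L) with
    | none => rw [hf] at hD; simp at hD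
    | some q => rw [hf] at hD; exact ⟨q, rfl, by simpa using hD⟩
  have hp0mem : p0 ∈ L := List.mem_of_find?_eq_some hp0
  have hp0hit := List.find?_some hp0
  rw [hp0]
  simp only [Option.map_some, hk]
  rw [if_pos trivial]
  -- A side: full flatten; B side: flatten of themes with key ≠ ""
  simp only [PySem.Dict.values, List.foldl_map, List.filter_map, List.flatMap_map]
  rw [pvFlatPairs]
  intro hcontra
  have hlen := congrArg List.length hcontra
  simp only [List.nil_append, PySem.Dict.values, ← List.flatMap_def, List.length_flatMap] at hlen
  -- p0's flattened objects are nonempty (they contain obj_category)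
  have hpos : 0 < (p0.2.items.flatMap (fun q => q.2)).length := by
    simp only [List.any_eq_true] at hp0hit
    obtain ⟨l, hl, hm⟩ := hp0hit
    simp only [PySem.Dict.values, List.mem_map] at hl
    obtain ⟨q, hq, hql⟩ := hl
    have : obj_category ∈ p0.2.items.flatMap (fun q => q.2) :=
      List.mem_flatMap.mpr ⟨q, hq, by rw [hql]; exact of_decide_eq_true hm⟩
    exact List.length_pos_of_mem this
  have hlt := pvSumFilterLt
    (fun p : String × PySem.Dict String (List String) => (p.2.items.flatMap (fun q => q.2)).length)
    ((fun tf : String × List String => some "" != some tf.1) ∘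
      (fun p : String × PySem.Dict String (List String) => (p.1, p.2.items.flatMap (fun q => q.2))))
    L p0 hp0mem (by simp [Function.comp, hk]) hpos
  simp only [List.length_flatMap, List.map_map, Function.comp] at hlen hlt hpos
  omega

-- ===== VERDICT (by name: the statement is the Claim_ definition above) =====
theorem process_droid_categories_spec : Claim_unchanged_process_droid_categories := by
  intro original_dict obj_category _
  unfold Spec_process_droid_categories
  exact process_eq original_dict obj_category

theorem process_droid_categories_changed : Claim_changed_process_droid_categories := by
  unfold Claim_changed_process_droid_categories; decide

theorem process_droid_categories_tight : Claim_exact_process_droid_categories := by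
  intro original_dict obj_category _ hD
  exact process_ne original_dict obj_category hD
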